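-- pv_equiv track=rewrite | github.com/akhilkammila/leetcode-screenshotter | editorial_code/1000-1999/1323. Maximum 69 Number/python-2.py | maximum69Number
-- ===== SOURCE A (Python) =====
-- def maximum69Number (num: int) -> int:
--     # Since we start with the lowest digit, initialize curr_digit = 0.
--     curr_digit = 0
--     index_first_six = -1
--     num_copy = num
--
--     # Check every digit of 'num_copy' from low to high.
--     while num_copy:
--         # If the current digit is '6', record it as the highest digit of 6.
--         if num_copy % 10 == 6:
--             index_first_six = curr_digit
--
--         # Move on to the next digit.
--         num_copy //= 10
--         curr_digit += 1
--
--     # If we don't find any digit of '6', return the original number,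
--     # otherwise, increment 'num' by the difference made by the first '6'.
--     return num if index_first_six == -1 else num + 3 * 10 ** index_first_six
-- ===== SOURCE B (Python) =====
-- def maximum69Number (num: int) -> int:
--     # Top-down divide and conquer: peel off the leading digit with a power of
--     # ten; flip it to 9 if it is a 6, otherwise keep it and recurse on the
--     # lower part, rebuilding the number as top * p + fixed remainder.
--     if num < 10:
--         return 9 if num == 6 else num
--     p = 1
--     while p * 10 <= num:
--         p *= 10
--     top, rest = num // p, num % p
--     if top == 6:
--         return 9 * p + rest
--     return top * p + maximum69Number(rest)
-- ===== Notes on version B (the rewrite author's own statement) =====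
-- stated objective: alternative
-- what changed: B is a top-down divide-and-conquer on the value itself: it isolates the leading digit via a computed power of ten, flips it to 9 if it is a 6, and otherwise rebuilds the number as top*p plus the recursively fixed remainder, instead of A's low-to-high digit scan that records the index of the last seen 6 and patches num with 3*10^index.
import Mathlib
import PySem

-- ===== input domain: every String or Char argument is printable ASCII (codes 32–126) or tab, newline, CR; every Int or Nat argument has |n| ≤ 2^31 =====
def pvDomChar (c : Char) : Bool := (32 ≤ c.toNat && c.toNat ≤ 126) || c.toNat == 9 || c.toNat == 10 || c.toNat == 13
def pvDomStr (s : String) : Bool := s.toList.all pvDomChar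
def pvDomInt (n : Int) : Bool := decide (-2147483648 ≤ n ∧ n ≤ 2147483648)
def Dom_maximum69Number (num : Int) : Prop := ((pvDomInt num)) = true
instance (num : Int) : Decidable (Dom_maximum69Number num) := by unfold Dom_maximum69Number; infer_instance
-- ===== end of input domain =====

-- B fixes the number top-down by divide and conquer (peel the leading digit with a power of ten, flip it if 6, else rebuild top*p + fixed remainder) instead of A's low-to-high scan that records an index and patches num additively; alternative decomposition, same value.

-- ===== PORT A =====
-- A's 'while num_copy' loop; it terminates only for num ≥ 0 (see Pre_), so it is run on num.toNat.
def pvALoop (numCopy : Nat) (currDigit : Int) (indexFirstSix : Int) : Int :=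
  if h : numCopy = 0 then indexFirstSix
  else pvALoop (numCopy / 10) (currDigit + 1)
      (if numCopy % 10 = 6 then currDigit else indexFirstSix)
decreasing_by exact Nat.div_lt_self (Nat.pos_of_ne_zero h) (by omega)

def maximum69Number (num : Int) : Int :=
  let indexFirstSix := pvALoop num.toNat 0 (-1)
  if indexFirstSix = -1 then num else num + 3 * 10 ^ indexFirstSix.toNat

-- ===== PORT B =====
-- B's 'while p * 10 <= num: p *= 10' loop; the fuel only makes it total (num.toNat steps always suffice).
def pvTopPow : Nat → Int → Int → Int
  | 0, p, _ => p
  | f + 1, p, num => if p * 10 ≤ num then pvTopPow f (p * 10) num else p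

-- B's recursion; the fuel only makes it total (the remainder shrinks, so num.toNat + 1 levels suffice).
def pvAltGo : Nat → Int → Int
  | 0, num => num
  | f + 1, num =>
    if num < 10 then (if num = 6 then 9 else num)
    else
      let p := pvTopPow num.toNat 1 num
      let top := PySem.Int.floordiv num p
      let rest := PySem.Int.mod num p
      if top = 6 then 9 * p + rest else top * p + pvAltGo f rest

def maximum69Number_alt (num : Int) : Int := pvAltGo (num.toNat + 1) num

-- ===== PRECONDITION & SPEC =====
-- Pre_ excludes negative num: there A's 'while num_copy' loop never terminates (num_copy stays negative), so A returns on exactly the inputs with 0 ≤ num.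
def Pre_maximum69Number (num : Int) : Prop := 0 ≤ num
instance (num : Int) : Decidable (Pre_maximum69Number num) := by unfold Pre_maximum69Number; infer_instance
def pvWitness_maximum69Number : Int := 9669

def Spec_maximum69Number (num : Int) (out : Int) : Prop := out = maximum69Number_alt num
instance (num : Int) (out : Int) : Decidable (Spec_maximum69Number num out) := by unfold Spec_maximum69Number; infer_instance

-- ===== CLAIM (what is proved, stated in full; the proofs are below) =====
def Claim_equal_maximum69Number : Prop := ∀ (num : Int), Dom_maximum69Number num → Pre_maximum69Number num → Spec_maximum69Number num (maximum69Number num)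

-- ===== LEMMAS AND PROOFS =====

-- Index (from the low end) of the highest digit 6 in a low-to-high digit list.
def pvLast6 : List Nat → Option Nat
  | [] => none
  | d :: t =>
    match pvLast6 t with
    | some i => some (i + 1)
    | none => if d = 6 then some 0 else none

-- Common target of both programs: n plus the correction at the highest 6, if any.
def pvTarget (n : Nat) : Int :=
  match pvLast6 (Nat.digits 10 n) with
  | some i => (n : Int) + 3 * 10 ^ i
  | none => (n : Int)

-- A's loop, re-expressed over the low-to-high digit list.
def pvDigitFold : List Nat → Int → Int → Int
  | [], _, idx => idx
  | d :: t, c, idx => pvDigitFold t (c + 1) (if d = 6 then c else idx)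

theorem pvALoop_eq_digitFold (m : Nat) : ∀ (c idx : Int),
    pvALoop m c idx = pvDigitFold (Nat.digits 10 m) c idx := by
  induction m using Nat.strong_induction_on with
  | _ m ih =>
    intro c idx
    by_cases h : m = 0
    · subst h; rw [pvALoop]; simp [pvDigitFold]
    · rw [pvALoop, Nat.digits_def' (by omega : 1 < 10) (Nat.pos_of_ne_zero h)]
      simp only [h, dif_neg, not_false_iff]
      rw [ih (m / 10) (Nat.div_lt_self (Nat.pos_of_ne_zero h) (by omega))]
      rfl

theorem pvDigitFold_last6 (ds : List Nat) : ∀ (c idx : Int),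
    pvDigitFold ds c idx =
      match pvLast6 ds with
      | some i => c + (i : Int)
      | none => idx := by
  induction ds with
  | nil => intro c idx; rfl
  | cons d t ih =>
    intro c idx
    rw [pvDigitFold, ih]
    cases hT : pvLast6 t with
    | some i =>
      simp only [pvLast6, hT]
      push_cast
      ring_nf
    | none =>
      by_cases hd : d = 6
      · subst hd; simp [pvLast6, hT]
      · simp [pvLast6, hT, hd]

-- A computes pvTarget.
theorem pvA_eq_target (n : Nat) : maximum69Number (n : Int) = pvTarget n := by
  unfold maximum69Number pvTarget
  rw [Int.toNat_natCast, pvALoop_eq_digitFold, pvDigitFold_last6]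
  cases h : pvLast6 (Nat.digits 10 n) with
  | none => simp
  | some i =>
    have h1 : ¬((0 : Int) + (i : Int) = -1) := by omega
    have h2 : ((0 : Int) + (i : Int)).toNat = i := by omega
    rw [if_neg h1, h2]

theorem pvLast6_append (xs : List Nat) : ∀ (ys : List Nat),
    pvLast6 (xs ++ ys) =
      match pvLast6 ys with
      | some j => some (xs.length + j)
      | none => pvLast6 xs := by
  induction xs with
  | nil => intro ys; cases h : pvLast6 ys <;> simp [pvLast6, h]
  | cons x t ih =>
    intro ys
    rw [List.cons_append, pvLast6, ih ys]
    cases h : pvLast6 ys with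
    | some j =>
      simp only [List.length_cons]
      have : t.length + j + 1 = t.length + 1 + j := by omega
      rw [this]
    | none => rfl

theorem pvLast6_replicate_zero (k : Nat) : pvLast6 (List.replicate k 0) = none := by
  induction k with
  | zero => rfl
  | succ m ih => rw [List.replicate_succ, pvLast6, ih]; simp

-- The power loop: started at p inside the range with enough fuel, it lands on
-- the largest p·10^j not exceeding num.
theorem pvTopPow_spec : ∀ (f : Nat) (p n : Int), 0 < p → p ≤ n → n < p * 10 ^ f →
    ∃ j : Nat, pvTopPow f p n = p * 10 ^ j ∧ p * 10 ^ j ≤ n ∧ n < p * 10 ^ j * 10 := by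
  intro f
  induction f with
  | zero => intro p n hp hpn hlt; simp at hlt; omega
  | succ f ih =>
    intro p n hp hpn hlt
    rw [pvTopPow]
    by_cases h : p * 10 ≤ n
    · rw [if_pos h]
      obtain ⟨j, h1, h2, h3⟩ := ih (p * 10) n (by omega) h
        (by rw [pow_succ] at hlt; nlinarith)
      exact ⟨j + 1, by rw [h1]; ring, by rw [pow_succ]; nlinarith, by rw [pow_succ]; nlinarith⟩
    · rw [if_neg h]
      exact ⟨0, by ring, by simpa using hpn, by simp; omega⟩

-- B's recursion computes pvTarget.
theorem pvAltGo_eq_target : ∀ (f n : Nat), n < f → pvAltGo f (n : Int) = pvTarget n := by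
  intro f
  induction f with
  | zero => intro n h; omega
  | succ f ih =>
    intro n hnf
    rw [pvAltGo]
    by_cases hsmall : n < 10
    · rw [if_pos (by exact_mod_cast hsmall)]
      interval_cases n <;> decide
    · rw [if_neg (by omega)]
      dsimp only
      have hfuel : (n : Int) < 1 * 10 ^ ((n : Int)).toNat := by
        rw [Int.toNat_natCast, one_mul]
        exact_mod_cast Nat.lt_pow_self (by omega)
      obtain ⟨j, hpw, hle, hlt⟩ := pvTopPow_spec ((n : Int)).toNat 1 (n : Int) one_pos
        (by omega) hfuel
      rw [one_mul] at hpw hle hlt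
      rw [hpw]
      have hPow : ((10 ^ j : Nat) : Int) = (10 : Int) ^ j := by push_cast; ring
      have hfd : PySem.Int.floordiv (n : Int) ((10 : Int) ^ j) = ((n / 10 ^ j : Nat) : Int) := by
        rw [← hPow]; exact PySem.Int.floordiv_natCast n (10 ^ j)
      have hmd : PySem.Int.mod (n : Int) ((10 : Int) ^ j) = ((n % 10 ^ j : Nat) : Int) := by
        rw [← hPow]; exact PySem.Int.mod_natCast n (10 ^ j)
      set top : Nat := n / 10 ^ j with htop
      set rest : Nat := n % 10 ^ j with hrest
      have hjle : (10 : Nat) ^ j ≤ n := by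
        have := hle; rw [← hPow] at this; exact_mod_cast this
      have hjlt : n < 10 ^ j * 10 := by
        have := hlt; rw [← hPow] at this; exact_mod_cast this
      have hppos : 0 < (10 : Nat) ^ j := pow_pos (by omega) j
      have htop1 : 1 ≤ top := by
        have h1 : 1 ≤ n / 10 ^ j := (Nat.le_div_iff_mul_le hppos).mpr (by omega)
        rw [htop]; exact h1
      have htop9 : top ≤ 9 := by
        have h1 : n / 10 ^ j < 10 := (Nat.div_lt_iff_lt_mul hppos).mpr (by omega)
        rw [htop]; omega
      have hrestlt : rest < 10 ^ j := Nat.mod_lt _ hppos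
      have hsplit : n = rest + 10 ^ j * top := by
        rw [htop, hrest, Nat.add_comm]
        exact (Nat.div_add_mod n (10 ^ j)).symm
      have hlenle : (Nat.digits 10 rest).length ≤ j :=
        (Nat.digits_length_le_iff (by omega : 1 < 10) rest).mpr hrestlt
      have htopd : Nat.digits 10 top = [top] := by
        interval_cases top <;> decide
      have hjeq : (Nat.digits 10 rest).length + (j - (Nat.digits 10 rest).length) = j := by
        omega
      have hdig : Nat.digits 10 n =
          Nat.digits 10 rest ++ List.replicate (j - (Nat.digits 10 rest).length) 0 ++ [top] := by
        rw [← htopd, Nat.digits_append_zeroes_append_digits (by omega : 1 < 10) (by omega : 0 < top),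
          hjeq, ← hsplit]
      have hlenall : (Nat.digits 10 rest ++
          List.replicate (j - (Nat.digits 10 rest).length) 0).length = j := by
        simp; omega
      have hcast : (n : Int) = (rest : Int) + (10 : Int) ^ j * (top : Int) := by
        rw [← hPow]; exact_mod_cast congrArg (Nat.cast : Nat → Int) hsplit
      by_cases htop6 : top = 6
      · rw [if_pos (by rw [hfd, htop6]; norm_num)]
        have hsome : pvLast6 (Nat.digits 10 n) = some j := by
          rw [hdig, pvLast6_append, hlenall]
          rw [show pvLast6 [top] = some 0 from by rw [htop6]; rfl]
          simp
        rw [hmd, pvTarget, hsome, hcast, htop6]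
        push_cast
        ring
      · rw [if_neg (by rw [hfd]; exact fun h => htop6 (by exact_mod_cast h))]
        have hrf : rest < f := by omega
        rw [hfd, hmd, ih rest hrf]
        have hnone : pvLast6 (Nat.digits 10 n) = pvLast6 (Nat.digits 10 rest) := by
          rw [hdig, pvLast6_append, hlenall]
          rw [show pvLast6 [top] = none from by simp [pvLast6, htop6]]
          dsimp only
          rw [pvLast6_append, pvLast6_replicate_zero]
        rw [pvTarget, pvTarget, hnone]
        cases hR : pvLast6 (Nat.digits 10 rest) with
        | none => rw [hcast]; ring
        | some i => rw [hcast]; push_cast; ring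

-- ===== VERDICT (by name: the statement is the Claim_ definition above) =====
theorem maximum69Number_spec : Claim_equal_maximum69Number := by
  intro num hdom hpre
  obtain ⟨n, rfl⟩ := Int.eq_ofNat_of_zero_le hpre
  unfold Spec_maximum69Number maximum69Number_alt
  rw [Int.toNat_natCast, pvAltGo_eq_target (n + 1) n (by omega), pvA_eq_target]
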